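-- pv_equiv track=rewrite | github.com/jerrypersonal000/obscure-cod | quickcalculate2.py | shortest_path_to_range
-- ===== SOURCE A (Python) =====
-- from collections import deque
--
-- def shortest_path_to_range(A, B, C):
--     queue = deque([(A, 0, [])])
--     visited = set()
--     operations = list(range(1, 10))
--     max_limit = 30000  # Set a numeric upper limit
--     max_queue_length = 10000  # Maximum queue length to prevent memory overflow
--
--     lower_bound = min(B, C)
--     upper_bound = max(B, C)
--
--     while queue and len(queue) < max_queue_length:
--         current, steps, path = queue.popleft()
--
--         if lower_bound <= current <= upper_bound:
--             return steps, path
--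
--         if abs(current) > max_limit:
--             continue
--
--         if steps > 100:  # Arbitrary step limit to prevent too long paths
--             continue
--
--         for op in operations:
--             next_steps = [
--                 (current + op, f"{current} + {op} = {current + op}"),
--                 (current - op, f"{current} - {op} = {current - op}"),
--                 (current * op, f"{current} * {op} = {current * op}"),
--                 (current // op if op != 0 else None, f"{current} // {op} = {current // op}" if op != 0 else None)
--             ]
--             for result, desc in next_steps:
--                 if result is not None and result not in visited and abs(result) <= max_limit:
--                     visited.add(result)
--                     if len(queue) < max_queue_length:  # Check queue length before appending
--                         queue.append((result, steps + 1, path + [desc]))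
--
--     return -1, []
-- ===== SOURCE B (Python) =====
-- def shortest_path_to_range(A, B, C):
--     # BFS over an indexed node arena: the list of nodes doubles as the queue
--     # (head pointer instead of popping); each node stores its parent index and
--     # the edge description, so the path is rebuilt once by walking parents.
--     nodes = [(A, 0, None, "")]  # (value, steps, parent index or None, desc)
--     head = 0
--     visited = set()
--     lo, hi = (B, C) if B <= C else (C, B)
--     while head < len(nodes) and len(nodes) - head < 10000:
--         value, steps, _, _ = nodes[head]
--         if lo <= value <= hi:
--             path = []
--             i = head
--             while nodes[i][2] is not None:
--                 path.append(nodes[i][3])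
--                 i = nodes[i][2]
--             return steps, path[::-1]
--         parent = head
--         head += 1
--         if abs(value) > 30000 or steps > 100:
--             continue
--         candidates = [c for op in range(1, 10) for c in (
--             (value + op, f"{value} + {op} = {value + op}"),
--             (value - op, f"{value} - {op} = {value - op}"),
--             (value * op, f"{value} * {op} = {value * op}"),
--             (value // op, f"{value} // {op} = {value // op}"))]
--         for result, desc in candidates:
--             if result not in visited and abs(result) <= 30000:
--                 visited.add(result)
--                 if len(nodes) - head < 10000:
--                     nodes.append((result, steps + 1, parent, desc))
--     return -1, []
-- ===== Notes on version B (the rewrite author's own statement) =====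
-- stated objective: alternative
-- what changed: B replaces the deque of (value, steps, copied path) with an indexed node arena that doubles as the queue (a head pointer instead of popping); each node stores a parent index and edge description, and the path is reconstructed once by walking parent indices and reversing, so no per-enqueue path copying.
import Mathlib
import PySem

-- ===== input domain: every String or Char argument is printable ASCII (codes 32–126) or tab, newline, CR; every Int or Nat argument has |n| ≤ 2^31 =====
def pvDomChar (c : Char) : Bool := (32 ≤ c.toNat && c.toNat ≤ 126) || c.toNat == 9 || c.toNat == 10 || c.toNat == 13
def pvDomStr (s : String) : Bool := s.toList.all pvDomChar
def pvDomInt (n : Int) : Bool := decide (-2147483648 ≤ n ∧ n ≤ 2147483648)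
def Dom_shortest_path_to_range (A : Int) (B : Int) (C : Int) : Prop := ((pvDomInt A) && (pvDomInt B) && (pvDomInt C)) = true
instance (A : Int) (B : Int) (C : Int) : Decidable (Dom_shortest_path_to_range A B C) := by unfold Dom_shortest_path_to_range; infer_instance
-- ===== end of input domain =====

-- B replaces A's deque of (value, steps, copied path) by an indexed node arena that doubles
-- as the queue (head pointer instead of popping); nodes store parent index + edge description
-- and the path is rebuilt once on success (objective: alternative data structure, same gating).
-- Both loops are fuel-indexed with fuel 70000: the Python loops pop at most
-- 1 + (number of visited.add calls) ≤ 1 + 60001 times (each added value is a distinct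
-- integer of absolute value ≤ 30000), so the fuel is never exhausted on a real run.

-- ===== PORT A =====
-- next_steps for one op (result/desc are None for the // entry when op = 0, as in A)
def pvCandA (current op : Int) : List (Option Int × Option String) :=
  [ (some (current + op), some (PySem.Int.toStr current ++ " + " ++ PySem.Int.toStr op ++ " = " ++ PySem.Int.toStr (current + op))),
    (some (current - op), some (PySem.Int.toStr current ++ " - " ++ PySem.Int.toStr op ++ " = " ++ PySem.Int.toStr (current - op))),
    (some (current * op), some (PySem.Int.toStr current ++ " * " ++ PySem.Int.toStr op ++ " = " ++ PySem.Int.toStr (current * op))),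
    ((if op ≠ 0 then some (PySem.Int.floordiv current op) else none),
     (if op ≠ 0 then some (PySem.Int.toStr current ++ " // " ++ PySem.Int.toStr op ++ " = " ++ PySem.Int.toStr (PySem.Int.floordiv current op)) else none)) ]

-- body of 'for result, desc in next_steps' (desc only used when result is not None)
def pvStepA (steps : Int) (path : List String)
    (st : List (Int × Int × List String) × PySem.Set Int) (rd : Option Int × Option String) :
    List (Int × Int × List String) × PySem.Set Int :=
  match rd with
  | (some r, some d) =>
    if ¬ PySem.Set.contains st.2 r ∧ r.natAbs ≤ 30000 then
      let vis := PySem.Set.add st.2 r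
      if st.1.length < 10000 then (st.1 ++ [(r, steps + 1, path ++ [d])], vis)
      else (st.1, vis)
    else st
  | _ => st

def pvExpandA (current steps : Int) (path : List String)
    (st : List (Int × Int × List String) × PySem.Set Int) :
    List (Int × Int × List String) × PySem.Set Int :=
  (PySem.List.pyRange 1 10 1).foldl
    (fun st op => (pvCandA current op).foldl (pvStepA steps path) st) st

def pvLoopA : Nat → List (Int × Int × List String) → PySem.Set Int → Int → Int → Int × List String
  | 0, _, _, _, _ => (-1, [])
  | fuel+1, q, vis, lo, hi =>
    if q.length < 10000 then
      match q with
      | [] => (-1, [])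
      | (current, steps, path) :: rest =>
        if lo ≤ current ∧ current ≤ hi then (steps, path)
        else if 30000 < current.natAbs then pvLoopA fuel rest vis lo hi
        else if 100 < steps then pvLoopA fuel rest vis lo hi
        else
          let st := pvExpandA current steps path (rest, vis)
          pvLoopA fuel st.1 st.2 lo hi
    else (-1, [])

def shortest_path_to_range (A : Int) (B : Int) (C : Int) : Int × List String :=
  pvLoopA 70000 [(A, 0, [])] PySem.Set.empty (min B C) (max B C)

-- ===== PORT B =====
-- an arena node: (value, steps, parent index or none, edge description)
abbrev pvNode : Type := Int × Int × Option Nat × String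

-- the four candidates produced by one op (op comes from range(1,10), never 0)
def pvQuad (value op : Int) : List (Int × String) :=
  [ (value + op, PySem.Int.toStr value ++ " + " ++ PySem.Int.toStr op ++ " = " ++ PySem.Int.toStr (value + op)),
    (value - op, PySem.Int.toStr value ++ " - " ++ PySem.Int.toStr op ++ " = " ++ PySem.Int.toStr (value - op)),
    (value * op, PySem.Int.toStr value ++ " * " ++ PySem.Int.toStr op ++ " = " ++ PySem.Int.toStr (value * op)),
    (PySem.Int.floordiv value op, PySem.Int.toStr value ++ " // " ++ PySem.Int.toStr op ++ " = " ++ PySem.Int.toStr (PySem.Int.floordiv value op)) ]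

-- the flat candidate comprehension '[c for op in range(1, 10) for c in (...)]'
def pvCandidates (value : Int) : List (Int × String) :=
  (PySem.List.pyRange 1 10 1).flatMap (pvQuad value)

-- the inner 'while nodes[i][2] is not None' walk (descs newest-first); parent indices
-- strictly decrease, so fuel = nodes.length always suffices
def pvRebuild : Nat → List pvNode → Nat → List String
  | 0, _, _ => []
  | fuel+1, nodes, i =>
    match nodes[i]? with
    | some (_, _, some p, d) => d :: pvRebuild fuel nodes p
    | _ => []

-- body of 'for result, desc in candidates'; queue length = len(nodes) - (parent + 1)
def pvEnq (steps : Int) (parent : Nat)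
    (st : List pvNode × PySem.Set Int) (rd : Int × String) : List pvNode × PySem.Set Int :=
  if ¬ PySem.Set.contains st.2 rd.1 ∧ rd.1.natAbs ≤ 30000 then
    let vis := PySem.Set.add st.2 rd.1
    if st.1.length - (parent + 1) < 10000 then
      (st.1 ++ [(rd.1, steps + 1, some parent, rd.2)], vis)
    else (st.1, vis)
  else st

def pvLoopArena : Nat → List pvNode → Nat → PySem.Set Int → Int → Int → Int × List String
  | 0, _, _, _, _, _ => (-1, [])
  | fuel+1, nodes, head, vis, lo, hi =>
    if head < nodes.length ∧ nodes.length - head < 10000 then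
      match nodes[head]? with
      | none => (-1, [])  -- unreachable: head < nodes.length
      | some (value, steps, _, _) =>
        if lo ≤ value ∧ value ≤ hi then (steps, (pvRebuild nodes.length nodes head).reverse)
        else if 30000 < value.natAbs ∨ 100 < steps then
          pvLoopArena fuel nodes (head + 1) vis lo hi
        else
          let st := (pvCandidates value).foldl (pvEnq steps head) (nodes, vis)
          pvLoopArena fuel st.1 (head + 1) st.2 lo hi
    else (-1, [])

def shortest_path_to_range_alt (A : Int) (B : Int) (C : Int) : Int × List String :=
  let lh := if B ≤ C then (B, C) else (C, B)
  pvLoopArena 70000 [(A, 0, none, "")] 0 PySem.Set.empty lh.1 lh.2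

-- ===== PRECONDITION & SPEC =====
def Spec_shortest_path_to_range (A : Int) (B : Int) (C : Int) (out : Int × List String) : Prop := out = shortest_path_to_range_alt A B C
instance (A : Int) (B : Int) (C : Int) (out : Int × List String) : Decidable (Spec_shortest_path_to_range A B C out) := by unfold Spec_shortest_path_to_range; infer_instance

-- ===== CLAIM (what is proved, stated in full; the proofs are below) =====
def Claim_equal_shortest_path_to_range : Prop := ∀ (A : Int) (B : Int) (C : Int), Dom_shortest_path_to_range A B C → Spec_shortest_path_to_range A B C (shortest_path_to_range A B C)

-- ===== LEMMAS AND PROOFS =====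

-- 'rebuilding from index i through any extension of nodes gives path, reversed'
def pvInvB (nodes : List pvNode) (i : Nat) (path : List String) : Prop :=
  ∀ nodes' f, nodes <+: nodes' → nodes.length ≤ f → pvRebuild f nodes' i = path.reverse

lemma pvGet_prefix {nodes nodes' : List pvNode} {i : Nat} (h : nodes <+: nodes')
    (hi : i < nodes.length) : nodes'[i]? = nodes[i]? := by
  obtain ⟨s, rfl⟩ := h
  exact List.getElem?_append_left hi

lemma pvInvB_mono {nodes nodes' : List pvNode} {i path} (h : nodes <+: nodes')
    (hI : pvInvB nodes i path) : pvInvB nodes' i path := by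
  intro t f h1 h2
  exact hI t f (h.trans h1) (le_trans h.length_le h2)

lemma pvInvB_init (a : Int) : pvInvB [(a, 0, none, "")] 0 [] := by
  intro nodes' f hpre hf
  obtain ⟨f, rfl⟩ : ∃ f', f = f' + 1 := ⟨f - 1, by simp at hf; omega⟩
  have hget : nodes'[0]? = some (a, 0, none, "") := by
    rw [pvGet_prefix hpre (by simp)]; rfl
  simp [pvRebuild, hget]

lemma pvInvB_append {nodes : List pvNode} {parent : Nat} {path : List String}
    (hI : pvInvB nodes parent path) (r s : Int) (d : String) :
    pvInvB (nodes ++ [(r, s, some parent, d)]) nodes.length (path ++ [d]) := by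
  intro nodes' f hpre hf
  simp only [List.length_append, List.length_cons, List.length_nil] at hf
  obtain ⟨f, rfl⟩ : ∃ f', f = f' + 1 := ⟨f - 1, by omega⟩
  have hget : nodes'[nodes.length]? = some (r, s, some parent, d) := by
    rw [pvGet_prefix hpre (by simp)]
    rw [List.getElem?_append_right le_rfl]
    simp
  simp only [pvRebuild, hget]
  rw [hI nodes' f ((List.prefix_append _ _).trans hpre) (by omega)]
  simp

-- A's queue entry a corresponds to arena index i
def pvARel (nodes : List pvNode) (a : Int × Int × List String) (i : Nat) : Prop :=
  (∃ par d, nodes[i]? = some (a.1, a.2.1, par, d)) ∧ pvInvB nodes i a.2.2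

lemma pvARel_mono {nodes nodes' : List pvNode} (h : nodes <+: nodes') {a i}
    (hr : pvARel nodes a i) : pvARel nodes' a i := by
  obtain ⟨⟨par, d, hget⟩, hI⟩ := hr
  have hi : i < nodes.length := (List.getElem?_eq_some_iff.1 hget).1
  exact ⟨⟨par, d, by rw [pvGet_prefix h hi]; exact hget⟩, pvInvB_mono h hI⟩

-- state relation during expansion of the node at index 'parent'
def pvFRel (parent : Nat) (sa : List (Int × Int × List String) × PySem.Set Int)
    (sb : List pvNode × PySem.Set Int) : Prop :=
  sa.2 = sb.2 ∧ parent + 1 ≤ sb.1.length ∧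
    List.Forall₂ (pvARel sb.1) sa.1 (List.range' (parent + 1) (sb.1.length - (parent + 1)))

lemma pvEnq_rel {parent : Nat} {steps : Int} {path : List String} {r : Int} {d : String}
    {sa : List (Int × Int × List String) × PySem.Set Int} {sb : List pvNode × PySem.Set Int}
    (h : pvFRel parent sa sb) (hI : pvInvB sb.1 parent path) :
    pvFRel parent (pvStepA steps path sa (some r, some d)) (pvEnq steps parent sb (r, d)) ∧
      sb.1 <+: (pvEnq steps parent sb (r, d)).1 := by
  obtain ⟨hv, hle, hq⟩ := h
  have hlen : sa.1.length = sb.1.length - (parent + 1) := by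
    have := hq.length_eq
    simpa using this
  simp only [pvStepA, pvEnq, ← hv]
  by_cases hc : ¬ PySem.Set.contains sa.2 r ∧ r.natAbs ≤ 30000
  · simp only [if_pos hc]
    by_cases hl : sa.1.length < 10000
    · rw [if_pos hl, if_pos (by omega : sb.1.length - (parent + 1) < 10000)]
      refine ⟨⟨rfl, by simp; omega, ?_⟩, List.prefix_append _ _⟩
      have hL : (sb.1 ++ [((r, steps + 1, some parent, d) : pvNode)]).length - (parent + 1)
          = (sb.1.length - (parent + 1)) + 1 := by simp; omega
      rw [hL, List.range'_1_concat,
        (by omega : parent + 1 + (sb.1.length - (parent + 1)) = sb.1.length)]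
      refine List.rel_append (hq.imp fun _ _ hr => pvARel_mono (List.prefix_append _ _) hr) ?_
      refine List.forall₂_cons.2 ⟨⟨⟨some parent, d, ?_⟩, pvInvB_append hI r (steps + 1) d⟩,
        List.Forall₂.nil⟩
      rw [List.getElem?_append_right le_rfl]; simp
    · rw [if_neg hl, if_neg (by omega : ¬ sb.1.length - (parent + 1) < 10000)]
      exact ⟨⟨rfl, hle, hq⟩, List.prefix_rfl⟩
  · simp only [if_neg hc]
    exact ⟨⟨hv, hle, hq⟩, List.prefix_rfl⟩

lemma pvFold_rel (parent : Nat) (steps : Int) (path : List String) (cs : List (Int × String)) :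
    ∀ sa sb, pvFRel parent sa sb → pvInvB sb.1 parent path →
      pvFRel parent
        ((cs.map (fun rd => ((some rd.1 : Option Int), (some rd.2 : Option String)))).foldl
          (pvStepA steps path) sa)
        (cs.foldl (pvEnq steps parent) sb) ∧
      sb.1 <+: (cs.foldl (pvEnq steps parent) sb).1 := by
  induction cs with
  | nil => intro sa sb h _; exact ⟨h, List.prefix_rfl⟩
  | cons c cs ih =>
    intro sa sb h hI
    simp only [List.map_cons, List.foldl_cons]
    have hs := pvEnq_rel (steps := steps) (path := path) (r := c.1) (d := c.2)
      (sa := sa) (sb := sb) h hI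
    have := ih _ _ hs.1 (pvInvB_mono hs.2 hI)
    exact ⟨this.1, hs.2.trans this.2⟩

lemma pvCand_map (value op : Int) (h : op ≠ 0) :
    pvCandA value op =
      (pvQuad value op).map (fun rd => ((some rd.1 : Option Int), (some rd.2 : Option String))) := by
  simp [pvCandA, pvQuad, h]

lemma pvOps_rel (ops : List Int) (h0 : ∀ op ∈ ops, op ≠ 0) (value steps : Int)
    (parent : Nat) (path : List String) :
    ∀ sa sb, pvFRel parent sa sb → pvInvB sb.1 parent path →
      pvFRel parent
        (ops.foldl (fun st op => (pvCandA value op).foldl (pvStepA steps path) st) sa)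
        ((ops.flatMap (pvQuad value)).foldl (pvEnq steps parent) sb) ∧
      sb.1 <+: ((ops.flatMap (pvQuad value)).foldl (pvEnq steps parent) sb).1 := by
  induction ops with
  | nil => intro sa sb h _; exact ⟨h, List.prefix_rfl⟩
  | cons op ops ih =>
    intro sa sb h hI
    simp only [List.foldl_cons, List.flatMap_cons, List.foldl_append]
    rw [pvCand_map value op (h0 op List.mem_cons_self)]
    have hs := pvFold_rel parent steps path (pvQuad value op) sa sb h hI
    have := ih (fun o ho => h0 o (List.mem_cons_of_mem _ ho)) _ _ hs.1 (pvInvB_mono hs.2 hI)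
    exact ⟨this.1, hs.2.trans this.2⟩

lemma pvLoopArena_get {fuel : Nat} {nodes : List pvNode} {head : Nat} {vis : PySem.Set Int}
    {lo hi value steps : Int} {par : Option Nat} {d : String}
    (h1 : head < nodes.length) (h2 : nodes.length - head < 10000)
    (hg : nodes[head]? = some (value, steps, par, d)) :
    pvLoopArena (fuel + 1) nodes head vis lo hi =
      if lo ≤ value ∧ value ≤ hi then (steps, (pvRebuild nodes.length nodes head).reverse)
      else if 30000 < value.natAbs ∨ 100 < steps then pvLoopArena fuel nodes (head + 1) vis lo hi
      else
        let st := (pvCandidates value).foldl (pvEnq steps head) (nodes, vis)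
        pvLoopArena fuel st.1 (head + 1) st.2 lo hi := by
  simp only [pvLoopArena]
  rw [if_pos (And.intro h1 h2), hg]

lemma pvLoop_rel : ∀ (fuel : Nat) (qa : List (Int × Int × List String)) (nodes : List pvNode)
    (head : Nat) (vis : PySem.Set Int) (lo hi : Int),
    head ≤ nodes.length →
    List.Forall₂ (pvARel nodes) qa (List.range' head (nodes.length - head)) →
    pvLoopA fuel qa vis lo hi = pvLoopArena fuel nodes head vis lo hi := by
  intro fuel
  induction fuel with
  | zero => intro qa nodes head vis lo hi _ _; rfl
  | succ fuel ih =>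
    intro qa nodes head vis lo hi hhd hq
    have hlen : qa.length = nodes.length - head := by
      have := hq.length_eq; simpa using this
    rcases Nat.eq_zero_or_pos (nodes.length - head) with hz | hpos
    · have hqa : qa = [] := List.length_eq_zero_iff.1 (by omega)
      subst hqa
      simp only [pvLoopA, pvLoopArena, List.length_nil]
      rw [if_pos (by omega), if_neg (by omega)]
    · obtain ⟨m, hm⟩ : ∃ m, nodes.length - head = m + 1 := ⟨nodes.length - head - 1, by omega⟩
      rw [hm, List.range'_succ] at hq
      cases hq with
      | cons hhd0 htl =>
        rename_i a qa'
        obtain ⟨a1, a2, a3⟩ := a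
        obtain ⟨⟨par, d, hget⟩, hI⟩ := hhd0
        simp only at hget hI
        have hql : qa'.length + 1 = m + 1 := by simpa using hlen.trans hm
        by_cases hbig : m + 1 < 10000
        · have hA : ((a1, a2, a3) :: qa').length < 10000 := by simp; omega
          rw [pvLoopArena_get (by omega) (by omega) hget]
          simp only [pvLoopA, if_pos hA]
          have htl' : List.Forall₂ (pvARel nodes) qa'
              (List.range' (head + 1) (nodes.length - (head + 1))) := by
            rw [(by omega : nodes.length - (head + 1) = m)]; exact htl
          by_cases hin : lo ≤ a1 ∧ a1 ≤ hi
          · simp only [if_pos hin]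
            rw [hI nodes nodes.length List.prefix_rfl le_rfl, List.reverse_reverse]
          · simp only [if_neg hin]
            by_cases habs : 30000 < a1.natAbs
            · simp only [if_pos habs, if_pos (Or.inl habs : 30000 < a1.natAbs ∨ 100 < a2)]
              exact ih _ _ _ _ _ _ (by omega) htl'
            · simp only [if_neg habs]
              by_cases hst : 100 < a2
              · simp only [if_pos hst, if_pos (Or.inr hst : 30000 < a1.natAbs ∨ 100 < a2)]
                exact ih _ _ _ _ _ _ (by omega) htl'
              · simp only [if_neg hst,
                  if_neg (by tauto : ¬ (30000 < a1.natAbs ∨ 100 < a2))]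
                have hex := pvOps_rel (PySem.List.pyRange 1 10 1) (by decide) a1 a2 head a3
                  (qa', vis) (nodes, vis) ⟨rfl, by simp; omega, htl'⟩ hI
                obtain ⟨⟨hv, hle, hq'⟩, -⟩ := hex
                simp only [pvExpandA, pvCandidates] at hv hq' hle ⊢
                rw [hv]
                exact ih _ _ _ _ _ _ hle hq'
        · have hA : ¬ ((a1, a2, a3) :: qa').length < 10000 := by simp; omega
          have hB : ¬ (head < nodes.length ∧ nodes.length - head < 10000) := by
            intro h; omega
          simp only [pvLoopA, pvLoopArena, if_neg hA, if_neg hB]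

-- ===== VERDICT (by name: the statement is the Claim_ definition above) =====
theorem shortest_path_to_range_spec : Claim_equal_shortest_path_to_range := by
  intro A B C _
  unfold Spec_shortest_path_to_range shortest_path_to_range shortest_path_to_range_alt
  have hlh : (if B ≤ C then (B, C) else (C, B)) = (min B C, max B C) := by
    by_cases h : B ≤ C <;> simp [min_def, max_def, h]
  rw [hlh]
  exact pvLoop_rel 70000 [(A, 0, [])] [(A, 0, none, "")] 0 PySem.Set.empty (min B C) (max B C)
    (by simp)
    (List.forall₂_cons.2 ⟨⟨⟨none, "", rfl⟩, pvInvB_init A⟩, List.Forall₂.nil⟩)
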